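-- pv_equiv track=rewrite | github.com/acvan11/algorithms_practice | python/security.py | threeTimes1hour
-- ===== SOURCE A (Python) =====
-- def threeTimes1hour(arr):
-- 	result = []
-- 	arr2 = []
-- 	for i in range(len(arr)-1):
-- 		if len(arr2) == 0:
-- 			arr2 = [arr[i]]
-- 		if arr[i+1]-arr[i] < 100:
-- 			arr2 += [arr[i+1]]
-- 		elif len(arr2) >=3:
-- 			result += arr2
-- 			arr2 = []
-- 		else:
-- 			arr2 = []
-- 	return result
-- ===== SOURCE B (Python) =====
-- def threeTimes1hour(arr):
--     breaks = [i + 1 for i in range(len(arr) - 1) if arr[i + 1] - arr[i] >= 100]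
--     result = []
--     for s, e in zip([0] + breaks, breaks):
--         if e - s >= 3:
--             result += arr[s:e]
--     return result
-- ===== Notes on version B (the rewrite author's own statement) =====
-- stated objective: alternative
-- what changed: Replaces A's single-pass run-accumulator (growing arr2 element by element and flushing on a gap) with a two-phase pipeline: first compute the list of gap-boundary indices (difference >= 100), then zip consecutive boundaries and concatenate each slice of length >= 3; the trailing segment has no closing boundary and so, like in A, is never emitted.
import Mathlib
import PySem

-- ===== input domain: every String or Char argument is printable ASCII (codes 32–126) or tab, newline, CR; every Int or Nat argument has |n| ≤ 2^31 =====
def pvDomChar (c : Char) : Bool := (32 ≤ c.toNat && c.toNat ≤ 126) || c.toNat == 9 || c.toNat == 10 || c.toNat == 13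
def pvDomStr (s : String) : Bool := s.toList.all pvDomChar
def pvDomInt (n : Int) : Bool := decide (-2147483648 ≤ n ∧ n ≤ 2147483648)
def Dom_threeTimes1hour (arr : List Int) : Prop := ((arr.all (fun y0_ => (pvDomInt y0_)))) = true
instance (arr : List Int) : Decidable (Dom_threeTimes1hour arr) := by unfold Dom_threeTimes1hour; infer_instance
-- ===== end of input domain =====

-- B replaces A's incremental run-accumulator pass with a two-phase pipeline (gap-boundary list, then slices between zipped boundaries); alternative decomposition, same cost.


-- ===== PORT A =====
-- one loop iteration of A: state (result, arr2)
def stepA (arr : List Int) (st : List Int × List Int) (i : Int) : List Int × List Int :=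
  let arr2 := if st.2.length = 0 then [PySem.List.pyGetD arr i 0] else st.2
  if PySem.List.pyGetD arr (i + 1) 0 - PySem.List.pyGetD arr i 0 < 100 then
    (st.1, arr2 ++ [PySem.List.pyGetD arr (i + 1) 0])
  else if 3 ≤ arr2.length then
    (st.1 ++ arr2, [])
  else
    (st.1, [])

def threeTimes1hour (arr : List Int) : List Int :=
  ((PySem.List.pyRange 0 ((arr.length : Int) - 1) 1).foldl (stepA arr) ([], [])).1

-- ===== PORT B =====
-- phase 1 of B: the gap-boundary indices i+1 with arr[i+1]-arr[i] >= 100, from range start j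
def brkFrom (arr : List Int) (j : Int) : List Int :=
  ((PySem.List.pyRange j ((arr.length : Int) - 1) 1).filter
      (fun i => decide (100 ≤ PySem.List.pyGetD arr (i + 1) 0 - PySem.List.pyGetD arr i 0))).map
    (fun i => i + 1)

-- phase 2 of B: over zipped consecutive boundaries (s, e), concatenate arr[s:e] when long enough
def emitSeg (arr : List Int) (res : List Int) (se : Int × Int) : List Int :=
  if 3 ≤ se.2 - se.1 then res ++ PySem.List.slice arr (some se.1) (some se.2) else res

def threeTimes1hour_alt (arr : List Int) : List Int :=
  let breaks := brkFrom arr 0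
  (((0 : Int) :: breaks).zip breaks).foldl (emitSeg arr) []

-- ===== PRECONDITION & SPEC =====
def Spec_threeTimes1hour (arr : List Int) (out : List Int) : Prop := out = threeTimes1hour_alt arr
instance (arr : List Int) (out : List Int) : Decidable (Spec_threeTimes1hour arr out) := by unfold Spec_threeTimes1hour; infer_instance

-- ===== CLAIM (what is proved, stated in full; the proofs are below) =====
def Claim_equal_threeTimes1hour : Prop := ∀ (arr : List Int), Dom_threeTimes1hour arr → Spec_threeTimes1hour arr (threeTimes1hour arr)

-- ===== LEMMAS AND PROOFS =====

-- invariant-carrying equivalence: A's loop from index i with accumulator arr2 started at `start`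
-- equals B's emit-fold over the boundaries still to come, zipped with the cursor `start` in front
lemma loop_eq (arr : List Int) (k : Nat) :
    ∀ (i start : Nat) (res arr2 : List Int),
      arr.length ≤ i + 1 + k →
      start ≤ i →
      (arr2 = [] ∧ start = i ∨
        (i < arr.length ∧ arr2 = (arr.drop start).take (i + 1 - start) ∧ arr2 ≠ [])) →
      ((PySem.List.pyRange (i : Int) ((arr.length : Int) - 1) 1).foldl (stepA arr) (res, arr2)).1
        = (((start : Int) :: brkFrom arr (i : Int)).zip (brkFrom arr (i : Int))).foldl (emitSeg arr) res := by
  induction k with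
  | zero =>
    intro i start res arr2 hk hsi hinv
    rw [brkFrom, PySem.List.pyRange_one_eq_nil (by omega)]
    rfl
  | succ k ih =>
    intro i start res arr2 hk hsi hinv
    by_cases hend : (arr.length : Int) - 1 ≤ (i : Int)
    · rw [brkFrom, PySem.List.pyRange_one_eq_nil hend]
      rfl
    · rw [not_le] at hend
      have hi1 : i + 1 < arr.length := by omega
      rw [PySem.List.pyRange_one_cons hend]
      simp only [List.foldl_cons]
      have hgi : PySem.List.pyGetD arr (i : Int) 0 = arr[i]'(by omega) := by
        rw [PySem.List.pyGetD_natCast, List.getD_eq_getElem arr 0 (by omega)]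
      have hgi1 : PySem.List.pyGetD arr ((i : Int) + 1) 0 = arr[i+1]'hi1 := by
        rw [show ((i : Int) + 1) = ((i + 1 : Nat) : Int) by push_cast; ring,
          PySem.List.pyGetD_natCast, List.getD_eq_getElem arr 0 hi1]
      -- post-set arr2
      set arr2' := if arr2.length = 0 then [PySem.List.pyGetD arr (i:Int) 0] else arr2 with harr2'
      have h2 : arr2' = (arr.drop start).take (i + 1 - start) ∧ arr2' ≠ [] := by
        rcases hinv with ⟨rfl, rfl⟩ | ⟨hlt, heq, hne⟩
        · have he : arr2' = [PySem.List.pyGetD arr (↑start) 0] := by simp [harr2']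
          rw [he]
          constructor
          · rw [hgi, show start + 1 - start = 1 by omega,
              List.drop_eq_getElem_cons (show start < arr.length by omega)]
            rfl
          · simp
        · rw [harr2', if_neg (by simp [hne])]
          exact ⟨heq, hne⟩
      have hlen2 : arr2'.length = i + 1 - start := by
        rw [h2.1]; simp; omega
      have hslice : PySem.List.slice arr (some (start : Int)) (some ((i : Int) + 1)) = arr2' := by
        have : ((i : Int) + 1) = ((i + 1 : Nat) : Int) := by push_cast; ring
        rw [this, PySem.List.slice_natCast, h2.1]
      have hcastsucc : ((i : Int) + 1) = ((i + 1 : Nat) : Int) := by push_cast; ring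
      -- unfold one step of brkFrom
      have hbrk : brkFrom arr (i : Int)
          = (if 100 ≤ PySem.List.pyGetD arr ((i:Int) + 1) 0 - PySem.List.pyGetD arr (i:Int) 0
              then ((i : Int) + 1) :: brkFrom arr ((i : Int) + 1)
              else brkFrom arr ((i : Int) + 1)) := by
        rw [brkFrom, PySem.List.pyRange_one_cons hend, List.filter_cons]
        by_cases hc : 100 ≤ PySem.List.pyGetD arr ((i:Int) + 1) 0 - PySem.List.pyGetD arr (i:Int) 0
        · rw [if_pos (by simpa using hc), if_pos hc]
          rfl
        · rw [if_neg (by simpa using hc), if_neg hc]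
          rfl
      by_cases hgap : PySem.List.pyGetD arr ((i:Int) + 1) 0 - PySem.List.pyGetD arr (i:Int) 0 < 100
      · -- no boundary at i: arr2 grows, breaks list unchanged
        have hA : stepA arr (res, arr2) (i : Int) = (res, arr2' ++ [PySem.List.pyGetD arr ((i:Int)+1) 0]) := by
          simp only [stepA, ← harr2']
          rw [if_pos hgap]
        rw [hA, hbrk, if_neg (by omega), hcastsucc]
        apply ih (i+1) start res _ (by omega) (by omega)
        right
        refine ⟨hi1, ?_, by simp [h2.2]⟩
        rw [show i + 1 + 1 - start = (i + 1 - start) + 1 by omega, List.take_add_one, ← h2.1,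
          show ((i + 1 : Nat) : Int) = (i : Int) + 1 by push_cast; ring, hgi1]
        congr 1
        rw [List.getElem?_drop, show start + (i + 1 - start) = i + 1 by omega,
          List.getElem?_eq_getElem hi1]
        rfl
      · -- boundary i+1: A flushes, B consumes the zipped pair (start, i+1)
        rw [not_lt] at hgap
        have hA : stepA arr (res, arr2) (i : Int)
            = ((if 3 ≤ arr2'.length then res ++ arr2' else res), []) := by
          simp only [stepA, ← harr2']
          rw [if_neg (by omega)]
          by_cases h3 : 3 ≤ arr2'.length
          · rw [if_pos h3, if_pos h3]
          · rw [if_neg h3, if_neg h3]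
        rw [hA, hbrk, if_pos hgap, List.zip_cons_cons, List.foldl_cons]
        have hemit : emitSeg arr res ((start : Int), (i : Int) + 1)
            = (if 3 ≤ arr2'.length then res ++ arr2' else res) := by
          rw [emitSeg]
          by_cases h3 : 3 ≤ arr2'.length
          · rw [if_pos (by simp only []; omega), hslice, if_pos h3]
          · rw [if_neg (by simp only []; omega), if_neg h3]
        rw [hemit, hcastsucc]
        exact ih (i+1) (i+1) _ [] (by omega) (le_refl _) (Or.inl ⟨rfl, rfl⟩)

-- ===== VERDICT (by name: the statement is the Claim_ definition above) =====
theorem threeTimes1hour_spec : Claim_equal_threeTimes1hour := by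
  intro arr _
  unfold Spec_threeTimes1hour threeTimes1hour threeTimes1hour_alt
  have := loop_eq arr arr.length 0 0 [] [] (by omega) (le_refl 0) (Or.inl ⟨rfl, rfl⟩)
  simpa using this
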